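-- pv_equiv track=rewrite | github.com/databricks/sjsonnet | bench/resources/starlark/allocation.py | benchmark_immutable
-- ===== SOURCE A (Python) =====
-- class ImmutableObj:
--     def __init__(self, f1, f2, f3, f4, f5, f6, f7, f8, f9, f10):
--         self.f1 = f1; self.f2 = f2; self.f3 = f3; self.f4 = f4; self.f5 = f5
--         self.f6 = f6; self.f7 = f7; self.f8 = f8; self.f9 = f9; self.f10 = f10
--
--     def withF1(self, v): return ImmutableObj(v, self.f2, self.f3, self.f4, self.f5, self.f6, self.f7, self.f8, self.f9, self.f10)
--     def withF2(self, v): return ImmutableObj(self.f1, v, self.f3, self.f4, self.f5, self.f6, self.f7, self.f8, self.f9, self.f10)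
--     def withF3(self, v): return ImmutableObj(self.f1, self.f2, v, self.f4, self.f5, self.f6, self.f7, self.f8, self.f9, self.f10)
--     def withF4(self, v): return ImmutableObj(self.f1, self.f2, self.f3, v, self.f5, self.f6, self.f7, self.f8, self.f9, self.f10)
--     def withF5(self, v): return ImmutableObj(self.f1, self.f2, self.f3, self.f4, v, self.f6, self.f7, self.f8, self.f9, self.f10)
--     def withF6(self, v): return ImmutableObj(self.f1, self.f2, self.f3, self.f4, self.f5, v, self.f7, self.f8, self.f9, self.f10)
--     def withF7(self, v): return ImmutableObj(self.f1, self.f2, self.f3, self.f4, self.f5, self.f6, v, self.f8, self.f9, self.f10)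
--     def withF8(self, v): return ImmutableObj(self.f1, self.f2, self.f3, self.f4, self.f5, self.f6, self.f7, v, self.f9, self.f10)
--     def withF9(self, v): return ImmutableObj(self.f1, self.f2, self.f3, self.f4, self.f5, self.f6, self.f7, self.f8, v, self.f10)
--     def withF10(self, v): return ImmutableObj(self.f1, self.f2, self.f3, self.f4, self.f5, self.f6, self.f7, self.f8, self.f9, v)
--
-- def benchmark_immutable(iterations):
--     obj = ImmutableObj(0,0,0,0,0,0,0,0,0,0)
--     for i in range(int(iterations)):
--         obj = obj.withF1(obj.f1 + i)
--         obj = obj.withF2(obj.f2 + i)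
--         obj = obj.withF3(obj.f3 + i)
--         obj = obj.withF4(obj.f4 + i)
--         obj = obj.withF5(obj.f5 + i)
--         obj = obj.withF6(obj.f6 + i)
--         obj = obj.withF7(obj.f7 + i)
--         obj = obj.withF8(obj.f8 + i)
--         obj = obj.withF9(obj.f9 + i)
--         obj = obj.withF10(obj.f10 + i)
--     return obj.f1 + obj.f2 + obj.f3 + obj.f4 + obj.f5 + obj.f6 + obj.f7 + obj.f8 + obj.f9 + obj.f10
-- ===== SOURCE B (Python) =====
-- def benchmark_immutable(iterations):
--     # Closed form: each of the 10 fields ends up as 0+1+...+(n-1) = n*(n-1)/2,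
--     # so the total is 10 * n*(n-1)/2 = 5*n*(n-1); negative counts give an empty loop.
--     n = max(int(iterations), 0)
--     return 5 * n * (n - 1)
-- ===== Notes on version B (the rewrite author's own statement) =====
-- stated objective: faster
-- what changed: Replaced the loop that threads ten fields through chained immutable-copy updates with an arithmetic closed form: each field ends as the triangular sum of the loop indices, so the result is ten times that sum.
import Mathlib
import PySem

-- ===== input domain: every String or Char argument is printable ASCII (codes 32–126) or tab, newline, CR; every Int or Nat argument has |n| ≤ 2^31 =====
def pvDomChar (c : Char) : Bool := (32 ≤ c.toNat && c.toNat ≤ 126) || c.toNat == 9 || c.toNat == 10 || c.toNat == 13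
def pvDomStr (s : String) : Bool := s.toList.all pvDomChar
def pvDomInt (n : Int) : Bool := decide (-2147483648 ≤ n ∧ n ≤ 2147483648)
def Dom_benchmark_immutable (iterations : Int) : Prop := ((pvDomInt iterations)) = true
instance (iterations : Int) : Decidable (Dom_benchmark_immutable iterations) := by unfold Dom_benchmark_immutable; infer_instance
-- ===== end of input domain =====

-- B replaces A's O(n) loop of chained immutable field updates by the closed form 5*n*(n-1) (objective: faster, asymptotic).

-- ===== PORT A =====
structure PvObj where
  f1 : Int
  f2 : Int
  f3 : Int
  f4 : Int
  f5 : Int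
  f6 : Int
  f7 : Int
  f8 : Int
  f9 : Int
  f10 : Int
deriving DecidableEq, Repr

def pvWithF1 (o : PvObj) (v : Int) : PvObj := ⟨v, o.f2, o.f3, o.f4, o.f5, o.f6, o.f7, o.f8, o.f9, o.f10⟩
def pvWithF2 (o : PvObj) (v : Int) : PvObj := ⟨o.f1, v, o.f3, o.f4, o.f5, o.f6, o.f7, o.f8, o.f9, o.f10⟩
def pvWithF3 (o : PvObj) (v : Int) : PvObj := ⟨o.f1, o.f2, v, o.f4, o.f5, o.f6, o.f7, o.f8, o.f9, o.f10⟩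
def pvWithF4 (o : PvObj) (v : Int) : PvObj := ⟨o.f1, o.f2, o.f3, v, o.f5, o.f6, o.f7, o.f8, o.f9, o.f10⟩
def pvWithF5 (o : PvObj) (v : Int) : PvObj := ⟨o.f1, o.f2, o.f3, o.f4, v, o.f6, o.f7, o.f8, o.f9, o.f10⟩
def pvWithF6 (o : PvObj) (v : Int) : PvObj := ⟨o.f1, o.f2, o.f3, o.f4, o.f5, v, o.f7, o.f8, o.f9, o.f10⟩
def pvWithF7 (o : PvObj) (v : Int) : PvObj := ⟨o.f1, o.f2, o.f3, o.f4, o.f5, o.f6, v, o.f8, o.f9, o.f10⟩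
def pvWithF8 (o : PvObj) (v : Int) : PvObj := ⟨o.f1, o.f2, o.f3, o.f4, o.f5, o.f6, o.f7, v, o.f9, o.f10⟩
def pvWithF9 (o : PvObj) (v : Int) : PvObj := ⟨o.f1, o.f2, o.f3, o.f4, o.f5, o.f6, o.f7, o.f8, v, o.f10⟩
def pvWithF10 (o : PvObj) (v : Int) : PvObj := ⟨o.f1, o.f2, o.f3, o.f4, o.f5, o.f6, o.f7, o.f8, o.f9, v⟩

-- one iteration of A's loop body, the ten reassignments in order
def pvStep (obj : PvObj) (i : Int) : PvObj :=
  let obj := pvWithF1 obj (obj.f1 + i)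
  let obj := pvWithF2 obj (obj.f2 + i)
  let obj := pvWithF3 obj (obj.f3 + i)
  let obj := pvWithF4 obj (obj.f4 + i)
  let obj := pvWithF5 obj (obj.f5 + i)
  let obj := pvWithF6 obj (obj.f6 + i)
  let obj := pvWithF7 obj (obj.f7 + i)
  let obj := pvWithF8 obj (obj.f8 + i)
  let obj := pvWithF9 obj (obj.f9 + i)
  pvWithF10 obj (obj.f10 + i)

def benchmark_immutable (iterations : Int) : Int :=
  let obj := (PySem.List.pyRange 0 iterations 1).foldl pvStep ⟨0,0,0,0,0,0,0,0,0,0⟩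
  obj.f1 + obj.f2 + obj.f3 + obj.f4 + obj.f5 + obj.f6 + obj.f7 + obj.f8 + obj.f9 + obj.f10

-- ===== PORT B =====
def benchmark_immutable_alt (iterations : Int) : Int :=
  let n := max iterations 0
  5 * n * (n - 1)

-- ===== PRECONDITION & SPEC =====
def Spec_benchmark_immutable (iterations : Int) (out : Int) : Prop := out = benchmark_immutable_alt iterations
instance (iterations : Int) (out : Int) : Decidable (Spec_benchmark_immutable iterations out) := by unfold Spec_benchmark_immutable; infer_instance

-- ===== CLAIM (what is proved, stated in full; the proofs are below) =====
def Claim_equal_benchmark_immutable : Prop := ∀ (iterations : Int), Dom_benchmark_immutable iterations → Spec_benchmark_immutable iterations (benchmark_immutable iterations)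

-- ===== LEMMAS AND PROOFS =====

-- loop invariant: from an all-equal state, every field stays equal and accumulates the running sum
theorem pvFold_diag (l : List Int) (a : Int) :
    l.foldl pvStep ⟨a,a,a,a,a,a,a,a,a,a⟩ = let s := l.foldl (· + ·) a; ⟨s,s,s,s,s,s,s,s,s,s⟩ := by
  induction l generalizing a with
  | nil => rfl
  | cons i t ih =>
      simp only [List.foldl_cons]
      have h : pvStep ⟨a,a,a,a,a,a,a,a,a,a⟩ i = ⟨a+i,a+i,a+i,a+i,a+i,a+i,a+i,a+i,a+i,a+i⟩ := by
        simp [pvStep, pvWithF1, pvWithF2, pvWithF3, pvWithF4, pvWithF5,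
              pvWithF6, pvWithF7, pvWithF8, pvWithF9, pvWithF10]
      rw [h, ih (a + i)]

-- twice the sum of range(m) is m*(m-1)
theorem pvSum_range (m : Nat) :
    2 * ((PySem.List.pyRange 0 (m : Int) 1).foldl (· + ·) 0) = (m : Int) * ((m : Int) - 1) := by
  induction m with
  | zero => simp [PySem.List.pyRange_one_eq_nil]
  | succ k ih =>
      have h : PySem.List.pyRange 0 ((k : Int) + 1) 1
          = PySem.List.pyRange 0 (k : Int) 1 ++ [(k : Int)] :=
        PySem.List.pyRange_one_succ_right (by positivity)
      push_cast
      rw [h, List.foldl_append]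
      simp only [List.foldl_cons, List.foldl_nil]
      push_cast at ih
      ring_nf
      ring_nf at ih
      omega

theorem pvRange_toNat (n : Int) :
    PySem.List.pyRange 0 n 1 = PySem.List.pyRange 0 (n.toNat : Int) 1 := by
  by_cases h : n ≤ 0
  · rw [PySem.List.pyRange_one_eq_nil h, PySem.List.pyRange_one_eq_nil (by omega)]
  · rw [Int.toNat_of_nonneg (by omega)]

-- ===== VERDICT (by name: the statement is the Claim_ definition above) =====
theorem benchmark_immutable_spec : Claim_equal_benchmark_immutable := by
  intro n _
  unfold Spec_benchmark_immutable benchmark_immutable benchmark_immutable_alt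
  rw [pvRange_toNat, pvFold_diag]
  have h := pvSum_range n.toNat
  simp only []
  have hmax : max n 0 = (n.toNat : Int) := by omega
  rw [hmax]
  set s := (PySem.List.pyRange 0 (n.toNat : Int) 1).foldl (· + ·) 0 with hs
  linear_combination 5 * h
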